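-- pv_equiv track=rewrite | github.com/ditthales/ListasIP | Tuplas e dicionários/23.1L6Q2 - Look at them!.py | ordenar_dicionario
-- ===== SOURCE A (Python) =====
-- def ordenar_dicionario(dicionario):
--     lista_de_nattys = []
--     lista_de_fake_nattys = []
--     for chave, valor in dicionario.items():
--         if "natty" in valor:
--             lista_de_nattys.append((chave, valor[0], valor[1]))
--         else:
--             lista_de_fake_nattys.append((chave, valor[0], valor[1]))
--     lista_de_nattys_ordenada = sorted(lista_de_nattys, key=lambda x: x[1], reverse=True)
--     lista_de_fake_nattys_ordenada = sorted(lista_de_fake_nattys, key=lambda x: x[1], reverse=True)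
--     return lista_de_nattys_ordenada, lista_de_fake_nattys_ordenada
-- ===== SOURCE B (Python) =====
-- def ordenar_dicionario(dicionario):
--     # sort ALL items once by valor[0] descending (stable), then partition in one pass
--     itens = sorted(dicionario.items(), key=lambda kv: kv[1][0], reverse=True)
--     lista_de_nattys = [(chave, valor[0], valor[1]) for chave, valor in itens if "natty" in valor]
--     lista_de_fake_nattys = [(chave, valor[0], valor[1]) for chave, valor in itens if "natty" not in valor]
--     return lista_de_nattys, lista_de_fake_nattys
-- ===== Notes on version B (the rewrite author's own statement) =====
-- stated objective: alternative
-- what changed: A partitions the items into two lists and then sorts each; B sorts all items once (stable, by valor[0] descending) and then partitions the globally sorted list, relying on sort stability for identical ordering.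
import Mathlib
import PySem

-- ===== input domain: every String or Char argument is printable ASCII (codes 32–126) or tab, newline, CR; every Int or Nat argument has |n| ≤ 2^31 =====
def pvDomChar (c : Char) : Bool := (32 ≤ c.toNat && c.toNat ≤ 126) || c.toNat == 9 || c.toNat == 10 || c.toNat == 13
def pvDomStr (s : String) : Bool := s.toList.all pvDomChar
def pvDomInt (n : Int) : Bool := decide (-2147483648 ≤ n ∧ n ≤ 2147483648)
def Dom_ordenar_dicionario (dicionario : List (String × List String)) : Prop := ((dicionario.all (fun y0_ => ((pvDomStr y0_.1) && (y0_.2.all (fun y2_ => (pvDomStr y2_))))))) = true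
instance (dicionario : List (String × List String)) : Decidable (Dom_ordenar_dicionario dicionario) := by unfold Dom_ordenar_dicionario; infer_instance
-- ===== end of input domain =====

-- B changes the decomposition: instead of A's partition-then-sort-each, B stably sorts all
-- items once by valor[0] descending and partitions the sorted list (same return value).

-- ===== PORT A =====
-- valor[0]/valor[1] raise IndexError in Python when len(valor) < 2; those inputs are
-- excluded by Pre_; the port skips such items.
def ordenar_dicionario (dicionario : List (String × List String)) : (List (String × String × String)) × (List (String × String × String)) :=
  let p := dicionario.foldl (fun (acc : List (String × String × String) × List (String × String × String)) kv =>
    if kv.2.contains "natty" then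
      match PySem.List.pyGet? kv.2 0, PySem.List.pyGet? kv.2 1 with
      | some a, some c => (acc.1 ++ [(kv.1, a, c)], acc.2)
      | _, _ => acc
    else
      match PySem.List.pyGet? kv.2 0, PySem.List.pyGet? kv.2 1 with
      | some a, some c => (acc.1, acc.2 ++ [(kv.1, a, c)])
      | _, _ => acc) ([], [])
  (PySem.List.sorted p.1 (fun x => x.2.1) true, PySem.List.sorted p.2 (fun x => x.2.1) true)

-- ===== PORT B =====
-- kv[1][0] in B's sort key raises on an empty valor in Python (excluded by Pre_); headD "" stands in.
-- (chave, valor[0], valor[1]) of B's comprehensions; none = the IndexError case excluded by Pre_.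
def pvTrip (kv : String × List String) : Option (String × String × String) :=
  match kv.2 with
  | a :: c :: _ => some (kv.1, a, c)
  | _ => none

def ordenar_dicionario_alt (dicionario : List (String × List String)) : (List (String × String × String)) × (List (String × String × String)) :=
  let itens := PySem.List.sorted dicionario (fun kv => kv.2.headD "") true
  (itens.filterMap (fun kv => if kv.2.contains "natty" then pvTrip kv else none),
   itens.filterMap (fun kv => if kv.2.contains "natty" then none else pvTrip kv))

-- ===== PRECONDITION & SPEC =====
-- Pre_ excludes exactly the inputs where Python A raises IndexError: some valor has fewer than two elements.
def Pre_ordenar_dicionario (dicionario : List (String × List String)) : Prop :=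
  ∀ kv ∈ dicionario, 2 ≤ kv.2.length
instance (dicionario : List (String × List String)) : Decidable (Pre_ordenar_dicionario dicionario) := by unfold Pre_ordenar_dicionario; infer_instance
def pvWitness_ordenar_dicionario : (List (String × List String)) := [("a", ["natty", "x"]), ("b", ["y", "z"])]
def Spec_ordenar_dicionario (dicionario : List (String × List String)) (out : (List (String × String × String)) × (List (String × String × String))) : Prop := out = ordenar_dicionario_alt dicionario
instance (dicionario : List (String × List String)) (out : (List (String × String × String)) × (List (String × String × String))) : Decidable (Spec_ordenar_dicionario dicionario out) := by unfold Spec_ordenar_dicionario; infer_instance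

-- ===== CLAIM (what is proved, stated in full; the proofs are below) =====
def Claim_equal_ordenar_dicionario : Prop := ∀ (dicionario : List (String × List String)), Dom_ordenar_dicionario dicionario → Pre_ordenar_dicionario dicionario → Spec_ordenar_dicionario dicionario (ordenar_dicionario dicionario)

-- ===== LEMMAS AND PROOFS =====

-- insertBy only inserts x, keeping the relative order of the rest: a filter not selecting x is unchanged.
theorem pv_filter_insertBy_neg {α : Type} (bef : α → α → Bool) (p : α → Bool) (x : α)
    (hx : p x = false) (ys : List α) :
    (PySem.List.insertBy bef x ys).filter p = ys.filter p := by
  induction ys with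
  | nil => simp [PySem.List.insertBy, hx]
  | cons y ys ih =>
    simp only [PySem.List.insertBy]
    split
    · simp [List.filter, hx]
    · simp only [List.filter_cons]
      split <;> simp [ih]

-- insertBy with the reverse comparator preserves descending-by-key pairwise order.
theorem pv_pairwise_insertBy {α κ : Type} [LinearOrder κ] (k : α → κ) (x : α) (ys : List α)
    (h : ys.Pairwise (fun a b => k b ≤ k a)) :
    (PySem.List.insertBy (fun a b => decide (k b < k a)) x ys).Pairwise (fun a b => k b ≤ k a) := by
  induction ys with
  | nil => simp [PySem.List.insertBy]
  | cons y ys ih =>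
    rcases List.pairwise_cons.mp h with ⟨hy, ht⟩
    simp only [PySem.List.insertBy]
    split
    · rename_i hlt
      refine List.pairwise_cons.mpr ⟨?_, h⟩
      intro z hz
      rcases List.mem_cons.mp hz with hz | hz
      · subst hz; exact le_of_lt (by simpa using hlt)
      · exact le_trans (hy z hz) (le_of_lt (by simpa using hlt))
    · rename_i hge
      refine List.pairwise_cons.mpr ⟨?_, ih ht⟩
      intro z hz
      rcases (PySem.List.mem_insertBy _ _ _ _).mp hz with hz | hz
      · subst hz; simpa using hge
      · exact hy z hz

-- inserting x with key c into a descending list puts x after every element with key c.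
theorem pv_filter_insertBy_pos {α κ : Type} [LinearOrder κ] (k : α → κ) (c : κ) (x : α)
    (hx : k x = c) (ys : List α) (h : ys.Pairwise (fun a b => k b ≤ k a)) :
    (PySem.List.insertBy (fun a b => decide (k b < k a)) x ys).filter (fun a => decide (k a = c))
      = ys.filter (fun a => decide (k a = c)) ++ [x] := by
  induction ys with
  | nil => simp [PySem.List.insertBy, hx]
  | cons y ys ih =>
    rcases List.pairwise_cons.mp h with ⟨hy, ht⟩
    simp only [PySem.List.insertBy]
    split
    · rename_i hlt
      have hky : k y < k x := by simpa using hlt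
      have hyne : ¬ (k y = c) := by rw [← hx]; exact ne_of_lt hky
      have htail : ys.filter (fun a => decide (k a = c)) = [] := by
        rw [List.filter_eq_nil_iff]
        intro z hz
        have : k z ≤ k y := hy z hz
        simp only [decide_eq_true_eq]
        rw [← hx]; exact ne_of_lt (lt_of_le_of_lt this hky)
      simp [hx, hyne, htail]
    · simp only [List.filter_cons]
      split <;> simp [ih ht]

-- folding insertBy over xs appends, per key value, xs's matching elements after acc's.
theorem pv_filter_foldl_insertBy {α κ : Type} [LinearOrder κ] (k : α → κ) (c : κ)
    (xs : List α) : ∀ (acc : List α), acc.Pairwise (fun a b => k b ≤ k a) →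
    (xs.foldl (fun acc x => PySem.List.insertBy (fun a b => decide (k b < k a)) x acc) acc).filter (fun a => decide (k a = c))
      = acc.filter (fun a => decide (k a = c)) ++ xs.filter (fun a => decide (k a = c)) := by
  induction xs with
  | nil => intro acc _; simp
  | cons x xs ih =>
    intro acc hacc
    simp only [List.foldl_cons]
    rw [ih _ (pv_pairwise_insertBy k x acc hacc)]
    by_cases hx : k x = c
    · rw [pv_filter_insertBy_pos k c x hx acc hacc]
      simp [hx]
    · rw [pv_filter_insertBy_neg _ _ x (by simp [hx]) acc]
      simp [hx]

-- STABILITY of Python's reverse sort: per key value, the order of equal-key elements is kept.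
theorem pv_filter_sorted_rev {α κ : Type} [LinearOrder κ] (k : α → κ) (c : κ) (xs : List α) :
    (PySem.List.sorted xs k true).filter (fun a => decide (k a = c)) = xs.filter (fun a => decide (k a = c)) := by
  rw [PySem.List.sorted_rev_eq_foldl_insertBy]
  simpa using pv_filter_foldl_insertBy k c xs [] (by simp)

-- filterMap with a key-preserving f commutes with per-key filtering.
theorem pv_filterMap_filter {α β κ : Type} [DecidableEq κ] (f : α → Option β) (k : α → κ) (k' : β → κ)
    (h : ∀ a b, f a = some b → k' b = k a) (c : κ) (xs : List α) :
    (xs.filter (fun a => decide (k a = c))).filterMap f = (xs.filterMap f).filter (fun b => decide (k' b = c)) := by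
  induction xs with
  | nil => simp
  | cons x xs ih =>
    rcases hfx : f x with _ | b
    · by_cases hx : k x = c <;> simp [hfx, hx, ih]
    · have hk : k' b = k x := h x b hfx
      by_cases hx : k x = c <;>
        simp [hfx, hx, hk, ih]

-- a descending list is determined by its per-key filters.
theorem pv_unique_stable {β κ : Type} [LinearOrder κ] (k' : β → κ) :
    ∀ (ys zs : List β), ys.Pairwise (fun a b => k' b ≤ k' a) → zs.Pairwise (fun a b => k' b ≤ k' a) →
    (∀ c, ys.filter (fun b => decide (k' b = c)) = zs.filter (fun b => decide (k' b = c))) → ys = zs := by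
  intro ys
  induction ys with
  | nil =>
    intro zs _ _ hf
    cases zs with
    | nil => rfl
    | cons b zs =>
      have := hf (k' b)
      simp at this
  | cons a ys ih =>
    intro zs hys hzs hf
    cases zs with
    | nil =>
      have := hf (k' a)
      simp at this
    | cons b zs =>
      rcases List.pairwise_cons.mp hys with ⟨ha, hys'⟩
      rcases List.pairwise_cons.mp hzs with ⟨hb, hzs'⟩
      have hmemb : b ∈ a :: ys := by
        have := hf (k' b)
        have hb' : b ∈ (a :: ys).filter (fun x => decide (k' x = k' b)) := by
          rw [this]; simp
        exact List.mem_of_mem_filter hb'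
      have hmema : a ∈ b :: zs := by
        have := hf (k' a)
        have ha' : a ∈ (b :: zs).filter (fun x => decide (k' x = k' a)) := by
          rw [← this]; simp
        exact List.mem_of_mem_filter ha'
      have hkey : k' a = k' b := by
        have h1 : k' b ≤ k' a := by
          rcases List.mem_cons.mp hmemb with h | h
          · rw [h]
          · exact ha b h
        have h2 : k' a ≤ k' b := by
          rcases List.mem_cons.mp hmema with h | h
          · rw [h]
          · exact hb a h
        exact le_antisymm h2 h1
      have hhead := hf (k' a)
      rw [List.filter_cons, List.filter_cons, if_pos (by simp), if_pos (by simp [hkey.symm])] at hhead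
      have hab : a = b := (List.cons_eq_cons.mp hhead).1
      have htails : ∀ c, ys.filter (fun x => decide (k' x = c)) = zs.filter (fun x => decide (k' x = c)) := by
        intro c
        have := hf c
        rw [List.filter_cons, List.filter_cons, hab] at this
        split at this
        · exact (List.cons_eq_cons.mp this).2
        · exact this
      rw [hab, ih zs hys' hzs' htails]

-- MAIN: stable reverse sort commutes with a key-preserving filterMap.
theorem pv_sorted_filterMap {α β κ : Type} [LinearOrder κ] (f : α → Option β) (k : α → κ) (k' : β → κ)
    (h : ∀ a b, f a = some b → k' b = k a) (xs : List α) :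
    PySem.List.sorted (xs.filterMap f) k' true = (PySem.List.sorted xs k true).filterMap f := by
  apply pv_unique_stable k'
  · exact PySem.List.sorted_pairwise_rev _ _
  · rw [List.pairwise_filterMap]
    have := PySem.List.sorted_pairwise_rev xs k
    refine this.imp_of_mem ?_
    intro a b _ _ hle y hy y' hy'
    rw [h a y hy, h b y' hy']
    exact hle
  · intro c
    rw [pv_filter_sorted_rev k' c, ← pv_filterMap_filter f k k' h c xs,
        ← pv_filter_sorted_rev k c xs, pv_filterMap_filter f k k' h c]

theorem pv_int_nonneg (n : Nat) : (0:Int) ≤ (n:Int) + 1 := by positivity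

-- A's accumulating loop is the pair of filterMaps that B partitions with.
theorem pv_foldl_eq_filterMaps (xs : List (String × List String)) :
    ∀ (accN accF : List (String × String × String)),
    xs.foldl (fun (acc : List (String × String × String) × List (String × String × String)) kv =>
      if kv.2.contains "natty" then
        match PySem.List.pyGet? kv.2 0, PySem.List.pyGet? kv.2 1 with
        | some a, some c => (acc.1 ++ [(kv.1, a, c)], acc.2)
        | _, _ => acc
      else
        match PySem.List.pyGet? kv.2 0, PySem.List.pyGet? kv.2 1 with
        | some a, some c => (acc.1, acc.2 ++ [(kv.1, a, c)])
        | _, _ => acc) (accN, accF)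
      = (accN ++ xs.filterMap (fun kv => if kv.2.contains "natty" then pvTrip kv else none),
         accF ++ xs.filterMap (fun kv => if kv.2.contains "natty" then none else pvTrip kv)) := by
  induction xs with
  | nil => intro accN accF; simp
  | cons x xs ih =>
    intro accN accF
    obtain ⟨x1, x2⟩ := x
    simp only [List.foldl_cons, List.filterMap_cons]
    by_cases hx : "natty" ∈ x2 <;>
      rcases x2 with _ | ⟨a, _ | ⟨c, rest⟩⟩ <;>
        simp [pvTrip, PySem.List.pyGet?, PySem.List.pyIdx?, pv_int_nonneg, hx] at * <;> simp [ih]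

-- ===== VERDICT (by name: the statement is the Claim_ definition above) =====
theorem ordenar_dicionario_spec : Claim_equal_ordenar_dicionario := by
  intro d _ _
  unfold Spec_ordenar_dicionario ordenar_dicionario ordenar_dicionario_alt
  rw [pv_foldl_eq_filterMaps d [] []]
  simp only [List.nil_append]
  rw [Prod.mk.injEq]
  refine ⟨?_, ?_⟩ <;>
    · apply pv_sorted_filterMap
      intro kv t ht
      rcases hv : kv.2 with _ | ⟨a, _ | ⟨c, rest⟩⟩ <;>
        simp [pvTrip, hv] at ht ⊢; rw [← ht.2]
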